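-- pv_equiv track=rewrite | github.com/Birdi24/Genai-genesis-2026 | Fraus/backend/app/services/railtracks_service.py | _extract_scam_indicators
-- ===== SOURCE A (Python) =====
-- def _extract_scam_indicators(transcript: str, risk_level: str) -> list[str]:
--     text = transcript.lower()
--     indicators: list[str] = []
--     keyword_map = {
--         "otp": "otp request detected",
--         "one-time": "otp request detected",
--         "urgent": "urgency pressure language",
--         "immediately": "urgency pressure language",
--         "safe account": "fund transfer redirection",
--         "transfer": "fund transfer redirection",
--         "gift card": "gift-card payment signal",
--         "wire": "wire/payment coercion",
--         "crypto": "crypto payment coercion",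
--         "password": "credential harvesting attempt",
--     }
--     for keyword, label in keyword_map.items():
--         if keyword in text and label not in indicators:
--             indicators.append(label)
--
--     if risk_level.lower() in {"high", "critical"} and "high-risk verification context" not in indicators:
--         indicators.append("high-risk verification context")
--
--     return indicators or ["suspicious caller behavior"]
-- ===== SOURCE B (Python) =====
-- LABEL_KEYWORDS = [
--     ("otp request detected", ("otp", "one-time")),
--     ("urgency pressure language", ("urgent", "immediately")),
--     ("fund transfer redirection", ("safe account", "transfer")),
--     ("gift-card payment signal", ("gift card",)),
--     ("wire/payment coercion", ("wire",)),
--     ("crypto payment coercion", ("crypto",)),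
--     ("credential harvesting attempt", ("password",)),
-- ]
--
--
-- def _extract_scam_indicators(transcript: str, risk_level: str) -> list[str]:
--     text = transcript.lower()
--     indicators = [label for label, keywords in LABEL_KEYWORDS
--                   if any(k in text for k in keywords)]
--     if risk_level.lower() in ("high", "critical"):
--         indicators.append("high-risk verification context")
--     return indicators or ["suspicious caller behavior"]
-- ===== Notes on version B (the rewrite author's own statement) =====
-- stated objective: simpler
-- what changed: B groups the keywords by indicator label (preserving A's first-appearance label order) and builds the list with one comprehension over labels, so the 'label not in indicators' dedup scan and the 'not in indicators' guard before the high-risk append disappear; each label is considered exactly once.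
import Mathlib
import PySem

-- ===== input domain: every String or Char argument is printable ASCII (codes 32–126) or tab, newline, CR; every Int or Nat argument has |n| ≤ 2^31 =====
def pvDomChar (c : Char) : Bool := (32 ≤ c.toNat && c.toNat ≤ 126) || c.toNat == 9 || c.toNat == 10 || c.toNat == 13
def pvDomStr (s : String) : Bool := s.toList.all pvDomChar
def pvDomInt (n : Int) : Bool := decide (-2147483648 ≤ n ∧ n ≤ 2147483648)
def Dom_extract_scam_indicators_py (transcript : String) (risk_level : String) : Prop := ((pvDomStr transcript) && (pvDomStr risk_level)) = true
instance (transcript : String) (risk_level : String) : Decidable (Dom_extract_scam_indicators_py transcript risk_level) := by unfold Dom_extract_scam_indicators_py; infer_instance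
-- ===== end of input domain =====

-- B groups the keywords by indicator label and emits labels in one pass, removing A's per-keyword dedup membership scans (objective: simpler).


-- ===== PORT A =====
def extract_scam_indicators_py (transcript : String) (risk_level : String) : List String :=
  let text := PySem.Str.lower transcript
  let keyword_map : List (String × String) :=
    [("otp", "otp request detected"), ("one-time", "otp request detected"),
     ("urgent", "urgency pressure language"), ("immediately", "urgency pressure language"),
     ("safe account", "fund transfer redirection"), ("transfer", "fund transfer redirection"),
     ("gift card", "gift-card payment signal"), ("wire", "wire/payment coercion"),
     ("crypto", "crypto payment coercion"), ("password", "credential harvesting attempt")]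
  let indicators := keyword_map.foldl
    (fun ind kl => if PySem.Str.isIn kl.1 text && !(ind.contains kl.2) then ind ++ [kl.2] else ind) []
  let indicators :=
    if ["high", "critical"].contains (PySem.Str.lower risk_level)
        && !(indicators.contains "high-risk verification context") then
      indicators ++ ["high-risk verification context"]
    else indicators
  if indicators = [] then ["suspicious caller behavior"] else indicators

-- ===== PORT B =====
def pvLabelKeywords : List (String × List String) :=
  [("otp request detected", ["otp", "one-time"]),
   ("urgency pressure language", ["urgent", "immediately"]),
   ("fund transfer redirection", ["safe account", "transfer"]),
   ("gift-card payment signal", ["gift card"]),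
   ("wire/payment coercion", ["wire"]),
   ("crypto payment coercion", ["crypto"]),
   ("credential harvesting attempt", ["password"])]

def extract_scam_indicators_py_alt (transcript : String) (risk_level : String) : List String :=
  let text := PySem.Str.lower transcript
  let indicators :=
    (pvLabelKeywords.filter (fun lk => lk.2.any (fun k => PySem.Str.isIn k text))).map (fun lk => lk.1)
  let indicators :=
    if ["high", "critical"].contains (PySem.Str.lower risk_level) then
      indicators ++ ["high-risk verification context"]
    else indicators
  if indicators = [] then ["suspicious caller behavior"] else indicators

-- ===== PRECONDITION & SPEC =====
def Spec_extract_scam_indicators_py (transcript : String) (risk_level : String) (out : List String) : Prop := out = extract_scam_indicators_py_alt transcript risk_level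
instance (transcript : String) (risk_level : String) (out : List String) : Decidable (Spec_extract_scam_indicators_py transcript risk_level out) := by unfold Spec_extract_scam_indicators_py; infer_instance

-- ===== CLAIM (what is proved, stated in full; the proofs are below) =====
def Claim_equal_extract_scam_indicators_py : Prop := ∀ (transcript : String) (risk_level : String), Dom_extract_scam_indicators_py transcript risk_level → Spec_extract_scam_indicators_py transcript risk_level (extract_scam_indicators_py transcript risk_level)

-- ===== LEMMAS AND PROOFS =====

-- A's per-keyword fold step, abstracted for the group lemmas
def pvStepA (t : String) (ind : List String) (kl : String × String) : List String :=
  if PySem.Str.isIn kl.1 t && !(ind.contains kl.2) then ind ++ [kl.2] else ind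

-- the common closed form: one optional singleton per label, in label order
def pvE (t : String) : List String :=
  (if ["otp", "one-time"].any (fun k => PySem.Str.isIn k t) then ["otp request detected"] else [])
  ++ ((if ["urgent", "immediately"].any (fun k => PySem.Str.isIn k t) then ["urgency pressure language"] else [])
  ++ ((if ["safe account", "transfer"].any (fun k => PySem.Str.isIn k t) then ["fund transfer redirection"] else [])
  ++ ((if ["gift card"].any (fun k => PySem.Str.isIn k t) then ["gift-card payment signal"] else [])
  ++ ((if ["wire"].any (fun k => PySem.Str.isIn k t) then ["wire/payment coercion"] else [])
  ++ ((if ["crypto"].any (fun k => PySem.Str.isIn k t) then ["crypto payment coercion"] else [])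
  ++ (if ["password"].any (fun k => PySem.Str.isIn k t) then ["credential harvesting attempt"] else []))))))

theorem pv_group_skip (t l : String) (ind : List String) (h : ind.contains l = true)
    (ks : List String) :
    (ks.map (fun k => (k, l))).foldl (pvStepA t) ind = ind := by
  induction ks with
  | nil => rfl
  | cons k ks ih =>
    rw [List.map_cons, List.foldl_cons]
    have hm : l ∈ ind := by simpa using h
    have hstep : pvStepA t ind (k, l) = ind := by simp [pvStepA, hm]
    rw [hstep]; exact ih

theorem pv_group (t l : String) (ind : List String) (h : ind.contains l = false)
    (ks : List String) :
    (ks.map (fun k => (k, l))).foldl (pvStepA t) ind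
      = ind ++ (if ks.any (fun k => PySem.Str.isIn k t) then [l] else []) := by
  induction ks with
  | nil => simp
  | cons k ks ih =>
    rw [List.map_cons, List.foldl_cons]
    cases hk : PySem.Str.isIn k t with
    | false =>
      have hk' : PySem.Chars.isIn k.toList t.toList = false := by simpa using hk
      have hstep : pvStepA t ind (k, l) = ind := by simp [pvStepA, hk']
      rw [hstep, ih]
      simp [hk']
    | true =>
      have hk' : PySem.Chars.isIn k.toList t.toList = true := by simpa using hk
      have hm : l ∉ ind := by simpa using h
      have hstep : pvStepA t ind (k, l) = ind ++ [l] := by simp [pvStepA, hk', hm]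
      rw [hstep, pv_group_skip t l (ind ++ [l]) (by simp) ks]
      simp [hk']

theorem pv_contains_if (c : Bool) (l l' : String) (ind : List String)
    (h : ind.contains l = false) (hne : l ≠ l') :
    (ind ++ if c then [l'] else []).contains l = false := by
  cases c <;> simp_all

theorem pv_filtmap {α β : Type} (p : α → Bool) (f : α → β) (l : List α) :
    (l.filter p).map f = l.flatMap (fun x => if p x then [f x] else []) := by
  induction l with
  | nil => rfl
  | cons a t ih => by_cases h : p a <;> simp [h, ih]

-- A's fold over the literal keyword map equals the closed form pvE
theorem pv_foldA (t : String) :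
    List.foldl (fun ind (kl : String × String) =>
        if PySem.Str.isIn kl.1 t && !(ind.contains kl.2) then ind ++ [kl.2] else ind) []
      [("otp", "otp request detected"), ("one-time", "otp request detected"),
       ("urgent", "urgency pressure language"), ("immediately", "urgency pressure language"),
       ("safe account", "fund transfer redirection"), ("transfer", "fund transfer redirection"),
       ("gift card", "gift-card payment signal"), ("wire", "wire/payment coercion"),
       ("crypto", "crypto payment coercion"), ("password", "credential harvesting attempt")]
      = pvE t := by
  show List.foldl (pvStepA t) [] _ = pvE t
  rw [show ([("otp", "otp request detected"), ("one-time", "otp request detected"),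
       ("urgent", "urgency pressure language"), ("immediately", "urgency pressure language"),
       ("safe account", "fund transfer redirection"), ("transfer", "fund transfer redirection"),
       ("gift card", "gift-card payment signal"), ("wire", "wire/payment coercion"),
       ("crypto", "crypto payment coercion"), ("password", "credential harvesting attempt")]
       : List (String × String))
      = (["otp", "one-time"].map (fun k => (k, "otp request detected")))
        ++ ((["urgent", "immediately"].map (fun k => (k, "urgency pressure language")))
        ++ ((["safe account", "transfer"].map (fun k => (k, "fund transfer redirection")))
        ++ ((["gift card"].map (fun k => (k, "gift-card payment signal")))
        ++ ((["wire"].map (fun k => (k, "wire/payment coercion")))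
        ++ ((["crypto"].map (fun k => (k, "crypto payment coercion")))
        ++ (["password"].map (fun k => (k, "credential harvesting attempt")))))))) from rfl]
  rw [List.foldl_append, List.foldl_append, List.foldl_append, List.foldl_append,
      List.foldl_append, List.foldl_append]
  rw [pv_group t _ [] rfl]
  rw [pv_group t _ _ (pv_contains_if _ _ _ [] rfl (by decide))]
  rw [pv_group t _ _ (pv_contains_if _ _ _ _ (pv_contains_if _ _ _ [] rfl (by decide)) (by decide))]
  rw [pv_group t _ _ (pv_contains_if _ _ _ _ (pv_contains_if _ _ _ _ (pv_contains_if _ _ _ [] rfl (by decide)) (by decide)) (by decide))]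
  rw [pv_group t _ _ (pv_contains_if _ _ _ _ (pv_contains_if _ _ _ _ (pv_contains_if _ _ _ _ (pv_contains_if _ _ _ [] rfl (by decide)) (by decide)) (by decide)) (by decide))]
  rw [pv_group t _ _ (pv_contains_if _ _ _ _ (pv_contains_if _ _ _ _ (pv_contains_if _ _ _ _ (pv_contains_if _ _ _ _ (pv_contains_if _ _ _ [] rfl (by decide)) (by decide)) (by decide)) (by decide)) (by decide))]
  rw [pv_group t _ _ (pv_contains_if _ _ _ _ (pv_contains_if _ _ _ _ (pv_contains_if _ _ _ _ (pv_contains_if _ _ _ _ (pv_contains_if _ _ _ _ (pv_contains_if _ _ _ [] rfl (by decide)) (by decide)) (by decide)) (by decide)) (by decide)) (by decide))]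
  simp [pvE, List.append_assoc]

-- B's comprehension over the label table equals the same closed form
theorem pv_foldB (t : String) :
    (pvLabelKeywords.filter (fun lk => lk.2.any (fun k => PySem.Str.isIn k t))).map (fun lk => lk.1)
      = pvE t := by
  rw [pv_filtmap]
  simp only [pvLabelKeywords, List.flatMap_cons, List.flatMap_nil, List.append_nil, pvE]

theorem pvE_hrc (t : String) : (pvE t).contains "high-risk verification context" = false := by
  unfold pvE
  rw [← List.append_assoc, ← List.append_assoc, ← List.append_assoc, ← List.append_assoc,
      ← List.append_assoc]
  exact pv_contains_if _ _ _ _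
    (pv_contains_if _ _ _ _ (pv_contains_if _ _ _ _ (pv_contains_if _ _ _ _
      (pv_contains_if _ _ _ _ (pv_contains_if _ _ _ _ (pv_contains_if _ _ _ [] rfl (by decide))
        (by decide)) (by decide)) (by decide)) (by decide)) (by decide)) (by decide)

-- ===== VERDICT (by name: the statement is the Claim_ definition above) =====
theorem extract_scam_indicators_py_spec : Claim_equal_extract_scam_indicators_py := by
  intro transcript risk_level _
  unfold Spec_extract_scam_indicators_py extract_scam_indicators_py extract_scam_indicators_py_alt
  dsimp only
  rw [pv_foldA, pv_foldB, pvE_hrc]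
  simp only [Bool.not_false, Bool.and_true]
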